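-- pv_equiv track=rewrite | github.com/Sabrunnisa/python-basics | sacode2.py | longest_prefix_shared_by_at_least_two
-- ===== SOURCE A (Python) =====
-- def common_prefix(str1, str2):
--     length = min(len(str1), len(str2))
--     i = 0
--     while i < length and str1[i] == str2[i]:
--         i += 1
--     return str1[:i]
--
-- def longest_prefix_shared_by_at_least_two(strs):
--     max_prefix = ""
--     n = len(strs)
--     for i in range(n):
--         for j in range(i + 1, n):
--             prefix = common_prefix(strs[i], strs[j])
--             if len(prefix) > len(max_prefix):
--                 max_prefix = prefix
--     return max_prefix
-- ===== SOURCE B (Python) =====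
-- def longest_prefix_shared_by_at_least_two(strs):
--     srt = sorted(strs)
--     L = 0
--     for a, b in zip(srt, srt[1:]):
--         k = 0
--         m = min(len(a), len(b))
--         while k < m and a[k] == b[k]:
--             k += 1
--         if k > L:
--             L = k
--     if L == 0:
--         return ""
--     counts = {}
--     for s in strs:
--         if len(s) >= L:
--             p = s[:L]
--             counts[p] = counts.get(p, 0) + 1
--     for s in strs:
--         if len(s) >= L:
--             p = s[:L]
--             if counts[p] >= 2:
--                 return p
--     return ""
-- ===== Notes on version B (the rewrite author's own statement) =====
-- stated objective: faster
-- what changed: Replaces the all-pairs quadratic scan by: sort once and take the maximum common-prefix length L over adjacent sorted pairs, then recover A's tie-break (the first string with a later partner sharing L characters) with one counting pass over L-prefixes and one scan pass.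
import Mathlib
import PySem

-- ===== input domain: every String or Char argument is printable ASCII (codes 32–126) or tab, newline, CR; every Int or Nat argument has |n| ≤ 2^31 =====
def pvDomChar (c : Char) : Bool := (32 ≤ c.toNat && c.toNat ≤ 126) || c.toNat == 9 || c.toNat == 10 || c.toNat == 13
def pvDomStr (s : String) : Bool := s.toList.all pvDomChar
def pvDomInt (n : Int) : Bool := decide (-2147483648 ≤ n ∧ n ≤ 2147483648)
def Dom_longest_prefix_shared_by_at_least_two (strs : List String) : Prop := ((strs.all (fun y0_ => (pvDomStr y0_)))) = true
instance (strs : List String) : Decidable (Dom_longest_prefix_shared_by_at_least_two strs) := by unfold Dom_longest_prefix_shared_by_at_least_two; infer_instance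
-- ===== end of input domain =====

-- B replaces A's all-pairs scan by sort + adjacent-pair maximum + a counting pass that recovers
-- A's tie-break (objective: faster, O(n^2·L) → O(n·L·log n)).

-- ===== PORT A =====
-- shared helper: the char-by-char loop 'i = 0; while i < min(len1,len2) and s1[i] == s2[i]: i += 1'
-- (both Pythons contain this exact loop; it returns the final i)
def cpLen : List Char → List Char → Nat
  | a :: as, b :: bs => if a = b then cpLen as bs + 1 else 0
  | _, _ => 0

-- 'return str1[:i]' with 0 ≤ i ≤ len(str1): the slice is List.take
def common_prefix (str1 str2 : String) : String :=
  String.ofList (str1.toList.take (cpLen str1.toList str2.toList))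

-- 'for i in range(n): for j in range(i+1, n): …' — outer i ↦ head of the remaining tail,
-- inner j ↦ left fold over that tail; state max_prefix threaded through
def loopA : List String → String → String
  | [], acc => acc
  | s :: rest, acc =>
      loopA rest (rest.foldl (fun m t =>
        let p := common_prefix s t
        if m.toList.length < p.toList.length then p else m) acc)

def longest_prefix_shared_by_at_least_two (strs : List String) : String :=
  loopA strs ""

-- ===== PORT B =====
-- 'for a, b in zip(srt, srt[1:]): k = <char loop>; if k > L: L = k'  (srt[1:] = tail)
def maxAdj (srt : List String) : Nat :=
  (srt.zip srt.tail).foldl (fun L ab =>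
    let k := cpLen ab.1.toList ab.2.toList
    if L < k then k else L) 0

-- 'counts = {}; for s in strs: if len(s) >= L: p = s[:L]; counts[p] = counts.get(p, 0) + 1'
def buildCounts (strs : List String) (L : Nat) : PySem.Dict String Int :=
  strs.foldl (fun d s =>
    if L ≤ s.toList.length then
      let p := String.ofList (s.toList.take L)
      d.insert p (d.getD p 0 + 1)
    else d) PySem.Dict.empty

-- 'for s in strs: if len(s) >= L: p = s[:L]; if counts[p] >= 2: return p' ; final 'return ""'
-- (counts[p] never raises here: p was inserted in the counting pass, so getD is exact)
def scanB (counts : PySem.Dict String Int) (L : Nat) : List String → String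
  | [] => ""
  | s :: rest =>
      if L ≤ s.toList.length then
        let p := String.ofList (s.toList.take L)
        if 2 ≤ counts.getD p 0 then p else scanB counts L rest
      else scanB counts L rest

def longest_prefix_shared_by_at_least_two_alt (strs : List String) : String :=
  let srt := PySem.List.sorted strs (fun x => x) false
  let L := maxAdj srt
  if L = 0 then ""
  else scanB (buildCounts strs L) L strs

-- ===== PRECONDITION & SPEC =====
def Spec_longest_prefix_shared_by_at_least_two (strs : List String) (out : String) : Prop := out = longest_prefix_shared_by_at_least_two_alt strs
instance (strs : List String) (out : String) : Decidable (Spec_longest_prefix_shared_by_at_least_two strs out) := by unfold Spec_longest_prefix_shared_by_at_least_two; infer_instance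

-- ===== CLAIM (what is proved, stated in full; the proofs are below) =====
def Claim_equal_longest_prefix_shared_by_at_least_two : Prop := ∀ (strs : List String), Dom_longest_prefix_shared_by_at_least_two strs → Spec_longest_prefix_shared_by_at_least_two strs (longest_prefix_shared_by_at_least_two strs)

-- ===== LEMMAS AND PROOFS =====

-- proof-side reference quantities
def cpBest (s : String) (rest : List String) : Nat :=
  rest.foldr (fun t m => max (cpLen s.toList t.toList) m) 0

def mp : List String → Nat
  | [] => 0
  | s :: rest => max (cpBest s rest) (mp rest)

def pick : List String → Nat → List Char
  | [], _ => []
  | s :: rest, L => if L ≤ cpBest s rest then s.toList.take L else pick rest L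

-- basic cpLen facts
theorem cpLen_le_left : ∀ (a b : List Char), cpLen a b ≤ a.length
  | [], b => by cases b <;> simp [cpLen]
  | _ :: _, [] => by simp [cpLen]
  | a :: as, b :: bs => by
      have := cpLen_le_left as bs
      by_cases h : a = b <;> simp [cpLen, h] <;> omega

theorem le_cpLen_iff : ∀ (a b : List Char) (k : Nat),
    k ≤ cpLen a b ↔ (k ≤ a.length ∧ k ≤ b.length ∧ a.take k = b.take k)
  | a, b, 0 => by simp
  | [], b, (k+1) => by cases b <;> simp [cpLen]
  | _ :: _, [], (k+1) => by simp [cpLen]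
  | a :: as, b :: bs, (k+1) => by
      by_cases h : a = b
      · subst h
        simp only [cpLen, if_true, eq_self_iff_true, List.take_succ_cons, List.length_cons]
        have := le_cpLen_iff as bs k
        constructor
        · intro hk
          have hk' : k ≤ cpLen as bs := by omega
          rcases (this.mp hk') with ⟨h1, h2, h3⟩
          exact ⟨by omega, by omega, by simp [h3]⟩
        · rintro ⟨h1, h2, h3⟩
          have h3' : as.take k = bs.take k := by simpa using h3
          have := this.mpr ⟨by omega, by omega, h3'⟩
          omega
      · simp only [cpLen, if_neg h, List.take_succ_cons]
        constructor
        · omega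
        · rintro ⟨_, _, h3⟩
          exact absurd (by simpa using List.head_eq_of_cons_eq h3) h

-- cpBest facts
theorem cpBest_cons (s t : String) (rest : List String) :
    cpBest s (t :: rest) = max (cpLen s.toList t.toList) (cpBest s rest) := rfl

theorem cpBest_le_len (s : String) : ∀ (rest : List String), cpBest s rest ≤ s.toList.length
  | [] => by simp [cpBest]
  | t :: rest => by
      have h1 := cpLen_le_left s.toList t.toList
      have h2 := cpBest_le_len s rest
      rw [cpBest_cons]; omega

theorem le_cpBest_iff (s : String) (k : Nat) (hk : 0 < k) :
    ∀ (rest : List String), k ≤ cpBest s rest ↔ ∃ t ∈ rest, k ≤ cpLen s.toList t.toList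
  | [] => by simp [cpBest]; omega
  | t :: rest => by
      rw [cpBest_cons]
      have := le_cpBest_iff s k hk rest
      constructor
      · intro h
        rcases Nat.le_total (cpLen s.toList t.toList) (cpBest s rest) with h' | h'
        · rcases this.mp (by omega) with ⟨u, hu, hku⟩
          exact ⟨u, by simp [hu], hku⟩
        · by_cases hkt : k ≤ cpLen s.toList t.toList
          · exact ⟨t, by simp, hkt⟩
          · rcases this.mp (by omega) with ⟨u, hu, hku⟩
            exact ⟨u, by simp [hu], hku⟩
      · rintro ⟨u, hu, hku⟩
        rcases List.mem_cons.mp hu with h | h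
        · subst h; omega
        · have := this.mpr ⟨u, h, hku⟩; omega

-- maxAdj structure
theorem foldl_max_aux (key : String × String → Nat) :
    ∀ (ps : List (String × String)) (z w : Nat),
      ps.foldr (fun ab m => max (key ab) m) (max z w) = max w (ps.foldr (fun ab m => max (key ab) m) z)
  | [], z, w => by simp [Nat.max_comm]
  | x :: ps, z, w => by
      simp only [List.foldr_cons]
      rw [foldl_max_aux key ps z w]
      omega

theorem foldl_eq_foldr_max (key : String × String → Nat) :
    ∀ (ps : List (String × String)) (z : Nat),
      ps.foldl (fun L ab => if L < key ab then key ab else L) z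
        = ps.foldr (fun ab m => max (key ab) m) z
  | [], z => rfl
  | x :: ps, z => by
      simp only [List.foldl_cons, List.foldr_cons]
      have h1 : (if z < key x then key x else z) = max z (key x) := by split <;> omega
      rw [h1, foldl_eq_foldr_max key ps (max z (key x)), foldl_max_aux key ps z (key x)]

theorem maxAdj_nil : maxAdj [] = 0 := rfl
theorem maxAdj_single (a : String) : maxAdj [a] = 0 := rfl

theorem maxAdj_cons₂ (a b : String) (rest : List String) :
    maxAdj (a :: b :: rest) = max (cpLen a.toList b.toList) (maxAdj (b :: rest)) := by
  unfold maxAdj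
  rw [foldl_eq_foldr_max, foldl_eq_foldr_max]
  simp [List.zip_cons_cons]

-- shared-prefix predicate bridge: p <+: s.toList as characterisation of "k ≤ cpLen"
theorem shares_of_prefix (p : List Char) (s t : String)
    (hs : p <+: s.toList) (ht : p <+: t.toList) : p.length ≤ cpLen s.toList t.toList := by
  rw [le_cpLen_iff]
  refine ⟨hs.length_le, ht.length_le, ?_⟩
  rw [← List.prefix_iff_eq_take.mp hs, ← List.prefix_iff_eq_take.mp ht]

theorem prefix_of_le_cpLen_left (s t : String) (k : Nat) (h : k ≤ cpLen s.toList t.toList) :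
    s.toList.take k <+: t.toList := by
  rcases (le_cpLen_iff s.toList t.toList k).mp h with ⟨h1, h2, h3⟩
  rw [List.prefix_iff_eq_take]
  rw [List.length_take, Nat.min_eq_left h1, h3]

-- (β) a pair in mp
theorem mp_to_pair : ∀ (xs : List String) (k : Nat), 0 < k → k ≤ mp xs →
    ∃ p : List Char, p.length = k ∧ 2 ≤ xs.countP (fun s => decide (p <+: s.toList))
  | [], k, hk, h => by simp [mp] at h; omega
  | s :: rest, k, hk, h => by
      rw [show mp (s :: rest) = max (cpBest s rest) (mp rest) from rfl] at h
      by_cases hc : k ≤ cpBest s rest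
      · rcases (le_cpBest_iff s k hk rest).mp hc with ⟨t, ht, hkt⟩
        refine ⟨s.toList.take k, ?_, ?_⟩
        · rw [List.length_take, Nat.min_eq_left]
          exact le_trans hkt (cpLen_le_left _ _)
        · have hps : (s.toList.take k) <+: s.toList := List.take_prefix k _
          have hpt : (s.toList.take k) <+: t.toList := prefix_of_le_cpLen_left s t k hkt
          have h1 : 0 < rest.countP (fun u => decide ((s.toList.take k) <+: u.toList)) :=
            List.countP_pos_iff.mpr ⟨t, ht, by simpa using hpt⟩
          rw [List.countP_cons_of_pos (by simpa using hps)]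
          omega
      · rcases mp_to_pair rest k hk (by omega) with ⟨p, hp, h2⟩
        refine ⟨p, hp, ?_⟩
        rw [List.countP_cons]; omega

-- (γ) a pair bounds mp
theorem pair_to_mp : ∀ (xs : List String) (p : List Char),
    2 ≤ xs.countP (fun s => decide (p <+: s.toList)) → p.length ≤ mp xs
  | [], p, h => by simp at h
  | s :: rest, p, h => by
      rw [show mp (s :: rest) = max (cpBest s rest) (mp rest) from rfl]
      by_cases hs : p <+: s.toList
      · rw [List.countP_cons_of_pos (by simpa using hs)] at h
        have h1 : 0 < rest.countP (fun u => decide (p <+: u.toList)) := by omega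
        rcases List.countP_pos_iff.mp h1 with ⟨t, ht, hpt⟩
        have hpt' : p <+: t.toList := by simpa using hpt
        have hk : p.length ≤ cpLen s.toList t.toList := shares_of_prefix p s t hs hpt'
        by_cases hz : 0 < p.length
        · have := (le_cpBest_iff s p.length hz rest).mpr ⟨t, ht, hk⟩
          omega
        · omega
      · rw [List.countP_cons_of_neg (by simpa using hs)] at h
        have := pair_to_mp rest p h
        omega

-- (α) a pair in maxAdj
theorem adj_to_pair : ∀ (l : List String) (k : Nat), 0 < k → k ≤ maxAdj l →
    ∃ p : List Char, p.length = k ∧ 2 ≤ l.countP (fun s => decide (p <+: s.toList))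
  | [], k, hk, h => by rw [maxAdj_nil] at h; omega
  | [a], k, hk, h => by rw [maxAdj_single] at h; omega
  | a :: b :: rest, k, hk, h => by
      rw [maxAdj_cons₂] at h
      by_cases hab : k ≤ cpLen a.toList b.toList
      · refine ⟨a.toList.take k, ?_, ?_⟩
        · rw [List.length_take, Nat.min_eq_left (le_trans hab (cpLen_le_left _ _))]
        · have hpa : (a.toList.take k) <+: a.toList := List.take_prefix k _
          have hpb : (a.toList.take k) <+: b.toList := prefix_of_le_cpLen_left a b k hab
          rw [List.countP_cons_of_pos (by simpa using hpa),
              List.countP_cons_of_pos (by simpa using hpb)]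
          omega
      · rcases adj_to_pair (b :: rest) k hk (by omega) with ⟨p, hp, h2⟩
        refine ⟨p, hp, ?_⟩
        rw [List.countP_cons]; omega

-- lexicographic "between" lemma: if a ≤ b ≤ c and a, c share their first k characters, so does b
theorem lex_between : ∀ (k : Nat) (a b c : List Char),
    ¬ List.Lex (· < ·) b a → ¬ List.Lex (· < ·) c b →
    k ≤ a.length → k ≤ c.length → a.take k = c.take k →
    b.take k = a.take k ∧ k ≤ b.length
  | 0, a, b, c, _, _, _, _, _ => by simp
  | (k+1), [], b, c, hab, hbc, ha, hc, he => by simp at ha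
  | (k+1), x :: a', b, c, hab, hbc, ha, hc, he => by
      cases c with
      | nil => simp at hc
      | cons y c' =>
        cases b with
        | nil => exact absurd List.Lex.nil hab
        | cons z b' =>
          rw [List.take_succ_cons, List.take_succ_cons] at he
          have hxy : x = y := List.head_eq_of_cons_eq he
          have he' : a'.take k = c'.take k := List.tail_eq_of_cons_eq he
          rw [List.cons_lex_cons_iff] at hab hbc
          push_neg at hab hbc
          have hzx' : z = x := le_antisymm (by rw [hxy]; exact hbc.1) hab.1
          have hba' : ¬ List.Lex (· < ·) b' a' := hab.2 hzx'
          have hcb' : ¬ List.Lex (· < ·) c' b' := hbc.2 (by rw [hzx', hxy])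
          have := lex_between k a' b' c' hba' hcb' (by simpa using ha) (by simpa using hc) he'
          refine ⟨?_, by simp; omega⟩
          rw [List.take_succ_cons, List.take_succ_cons, hzx', this.1]

-- String order → list lex order
theorem not_lex_of_le (a b : String) (h : a ≤ b) : ¬ List.Lex (· < ·) b.toList a.toList := by
  intro hlex
  have : b < a := by
    rw [String.lt_iff_toList_lt]
    rw [show (b.toList < a.toList) = (b.toList).lt a.toList from rfl, List.lt_iff_lex_lt]
    exact hlex
  exact absurd h (not_le.mpr this)

-- (δ) on a sorted list any shared prefix is witnessed by an adjacent pair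
theorem pair_to_adj : ∀ (l : List String), l.Pairwise (· ≤ ·) →
    ∀ (p : List Char), 2 ≤ l.countP (fun s => decide (p <+: s.toList)) → p.length ≤ maxAdj l
  | [], _, p, h => by simp at h
  | [a], _, p, h => by
      simp only [List.countP_cons, List.countP_nil] at h
      split at h <;> omega
  | a :: b :: rest, hsort, p, h => by
      rw [maxAdj_cons₂]
      rcases List.pairwise_cons.mp hsort with ⟨hafirst, hsort'⟩
      by_cases hpa : p <+: a.toList
      · rw [List.countP_cons_of_pos (by simpa using hpa)] at h
        have h1 : 0 < (b :: rest).countP (fun u => decide (p <+: u.toList)) := by omega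
        rcases List.countP_pos_iff.mp h1 with ⟨t, ht, hpt⟩
        have hpt' : p <+: t.toList := by simpa using hpt
        -- a ≤ b ≤ t, p prefix of a and t ⇒ p prefix of b
        have hab : a ≤ b := hafirst b (by simp)
        have hbt : b ≤ t := by
          rcases List.mem_cons.mp ht with h' | h'
          · exact le_of_eq h'.symm
          · exact (List.pairwise_cons.mp hsort').1 t h'
        have hbetween := lex_between p.length a.toList b.toList t.toList
          (not_lex_of_le a b hab) (not_lex_of_le b t hbt)
          hpa.length_le hpt'.length_le
          (by rw [← List.prefix_iff_eq_take.mp hpa, ← List.prefix_iff_eq_take.mp hpt'])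
        have hpb : b.toList.take p.length = p := by
          rw [hbetween.1, ← List.prefix_iff_eq_take.mp hpa]
        have : p.length ≤ cpLen a.toList b.toList := by
          rw [le_cpLen_iff]
          exact ⟨hpa.length_le, hbetween.2, by rw [hpb, ← List.prefix_iff_eq_take.mp hpa]⟩
        omega
      · rw [List.countP_cons_of_neg (by simpa using hpa)] at h
        have := pair_to_adj (b :: rest) hsort' p h
        omega

-- maxAdj of the sorted list is mp of the original
theorem maxAdj_sorted_eq_mp (strs : List String) :
    maxAdj (PySem.List.sorted strs (fun x => x) false) = mp strs := by
  set srt := PySem.List.sorted strs (fun x => x) false with hsrt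
  have hperm : srt.Perm strs := PySem.List.sorted_perm strs (fun x => x) false
  have hsorted : srt.Pairwise (· ≤ ·) := PySem.List.sorted_pairwise strs (fun x => x)
  have h1 : maxAdj srt ≤ mp strs := by
    by_cases h : 0 < maxAdj srt
    · rcases adj_to_pair srt (maxAdj srt) h le_rfl with ⟨p, hp, h2⟩
      rw [hperm.countP_eq] at h2
      have := pair_to_mp strs p h2
      omega
    · omega
  have h2 : mp strs ≤ maxAdj srt := by
    by_cases h : 0 < mp strs
    · rcases mp_to_pair strs (mp strs) h le_rfl with ⟨p, hp, h2⟩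
      rw [← hperm.countP_eq] at h2
      have := pair_to_adj srt hsorted p h2
      omega
    · omega
  omega

-- ===== characterisation of A =====
theorem innerA_char (s : String) : ∀ (rest : List String) (acc : String),
    rest.foldl (fun m t =>
        let p := common_prefix s t
        if m.toList.length < p.toList.length then p else m) acc
      = if acc.toList.length < cpBest s rest
          then String.ofList (s.toList.take (cpBest s rest)) else acc
  | [], acc => by simp [cpBest]
  | t :: rest, acc => by
      rw [List.foldl_cons, innerA_char s rest, cpBest_cons]
      have hc := cpLen_le_left s.toList t.toList
      have hB := cpBest_le_len s rest
      have hlenp : (common_prefix s t).toList.length = cpLen s.toList t.toList := by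
        simp only [common_prefix, String.toList_ofList, List.length_take]; omega
      simp only [hlenp]
      by_cases h1 : acc.toList.length < cpLen s.toList t.toList
      · rw [if_pos h1]
        by_cases h2 : cpLen s.toList t.toList < cpBest s rest
        · rw [if_pos (by rw [hlenp]; exact h2), if_pos (by omega),
              Nat.max_eq_right (le_of_lt h2)]
        · rw [if_neg (by rw [hlenp]; omega), if_pos (by omega),
              Nat.max_eq_left (by omega)]
          rfl
      · rw [if_neg h1]
        by_cases h2 : acc.toList.length < cpBest s rest
        · rw [if_pos h2, if_pos (by omega), Nat.max_eq_right (by omega)]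
        · rw [if_neg h2, if_neg (by omega)]

theorem loopA_char : ∀ (xs : List String) (acc : String),
    loopA xs acc = if acc.toList.length < mp xs then String.ofList (pick xs (mp xs)) else acc
  | [], acc => by simp [loopA, mp, pick]
  | s :: rest, acc => by
      rw [show loopA (s :: rest) acc = loopA rest
        (rest.foldl (fun m t =>
          let p := common_prefix s t
          if m.toList.length < p.toList.length then p else m) acc) from rfl]
      rw [innerA_char s rest acc, loopA_char rest]
      have hB := cpBest_le_len s rest
      have hlen' : ∀ (k : Nat), k ≤ s.toList.length →
          (String.ofList (s.toList.take k)).toList.length = k := by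
        intro k hk; simp only [String.toList_ofList, List.length_take]; omega
      rw [show mp (s :: rest) = max (cpBest s rest) (mp rest) from rfl]
      rw [show pick (s :: rest) (max (cpBest s rest) (mp rest))
        = if max (cpBest s rest) (mp rest) ≤ cpBest s rest
            then s.toList.take (max (cpBest s rest) (mp rest))
            else pick rest (max (cpBest s rest) (mp rest)) from rfl]
      set B := cpBest s rest with hBdef
      set M := mp rest with hMdef
      by_cases h1 : acc.toList.length < B
      · rw [if_pos h1]
        by_cases h2 : M ≤ B
        · have hmax : max B M = B := by omega
          rw [hmax, if_neg (by rw [hlen' B hB]; omega), if_pos (by omega), if_pos (by omega)]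
        · have hmax : max B M = M := by omega
          rw [hmax, if_pos (by rw [hlen' B hB]; omega), if_pos (by omega), if_neg (by omega)]
      · rw [if_neg h1]
        by_cases h2 : acc.toList.length < M
        · have hmax : max B M = M := by omega
          rw [if_pos h2, hmax, if_pos (by omega), if_neg (by omega)]
        · rw [if_neg h2, if_neg (by omega)]

-- ===== characterisation of B =====
theorem buildCounts_getD (L : Nat) : ∀ (xs : List String) (d : PySem.Dict String Int) (q : String),
    (xs.foldl (fun d s =>
      if L ≤ s.toList.length then
        let p := String.ofList (s.toList.take L)
        d.insert p (d.getD p 0 + 1)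
      else d) d).getD q 0
    = d.getD q 0 + (xs.countP (fun s =>
        decide (L ≤ s.toList.length ∧ s.toList.take L = q.toList)) : Int)
  | [], d, q => by simp
  | s :: xs, d, q => by
      rw [List.foldl_cons, buildCounts_getD L xs]
      by_cases hs : L ≤ s.toList.length
      · simp only [if_pos hs]
        rw [PySem.Dict.getD_insert]
        by_cases hq : q = String.ofList (s.toList.take L)
        · have hq' : s.toList.take L = q.toList := by rw [hq, String.toList_ofList]
          rw [if_pos hq,
              List.countP_cons_of_pos (by simp only [decide_eq_true_eq]; exact ⟨hs, hq'⟩)]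
          subst hq
          push_cast; ring
        · have hq' : ¬ (s.toList.take L = q.toList) :=
            fun h => hq (by rw [h, String.ofList_toList])
          rw [if_neg hq,
              List.countP_cons_of_neg (by simp only [decide_eq_true_eq]; exact fun h => hq' h.2)]
      · simp only [if_neg hs]
        rw [List.countP_cons_of_neg (by simp only [decide_eq_true_eq]; exact fun h => hs h.1)]

theorem scanB_eq_pick (L : Nat) (hL : 0 < L) (counts : PySem.Dict String Int) :
    ∀ (ys : List String),
    (∀ t ∈ ys, L ≤ t.toList.length →
       counts.getD (String.ofList (t.toList.take L)) 0
         = (ys.countP (fun u =>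
             decide (L ≤ u.toList.length ∧ u.toList.take L = t.toList.take L)) : Int)) →
    scanB counts L ys = String.ofList (pick ys L)
  | [], _ => by simp [scanB, pick]
  | s :: rest, hyp => by
      have hcons : ∀ (t : String),
          (s :: rest).countP (fun u =>
             decide (L ≤ u.toList.length ∧ u.toList.take L = t.toList.take L))
          = rest.countP (fun u =>
             decide (L ≤ u.toList.length ∧ u.toList.take L = t.toList.take L))
            + if (L ≤ s.toList.length ∧ s.toList.take L = t.toList.take L) then 1 else 0 := by
        intro t; rw [List.countP_cons]; simp
      by_cases hs : L ≤ s.toList.length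
      · have hself := hyp s (by simp) hs
        rw [hcons s, if_pos (⟨hs, rfl⟩ : _ ∧ _)] at hself
        set cnt := rest.countP (fun u =>
             decide (L ≤ u.toList.length ∧ u.toList.take L = s.toList.take L)) with hcnt
        -- the scan test and the pick test are the same condition: some later string shares
        have hiff : (2 ≤ counts.getD (String.ofList (s.toList.take L)) 0) ↔ (L ≤ cpBest s rest) := by
          rw [hself]
          constructor
          · intro h
            have hpos : 0 < cnt := by omega
            rcases List.countP_pos_iff.mp hpos with ⟨t, ht, hshared⟩
            simp only [decide_eq_true_eq] at hshared
            refine (le_cpBest_iff s L hL rest).mpr ⟨t, ht, ?_⟩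
            rw [le_cpLen_iff]
            exact ⟨hs, hshared.1, hshared.2.symm⟩
          · intro h
            rcases (le_cpBest_iff s L hL rest).mp h with ⟨t, ht, hLt⟩
            rcases (le_cpLen_iff s.toList t.toList L).mp hLt with ⟨_, h2, h3⟩
            have hpos : 0 < cnt :=
              List.countP_pos_iff.mpr ⟨t, ht, by
                simp only [decide_eq_true_eq]; exact ⟨h2, h3.symm⟩⟩
            omega
        rw [show scanB counts L (s :: rest)
            = if L ≤ s.toList.length then
                (if 2 ≤ counts.getD (String.ofList (s.toList.take L)) 0
                 then String.ofList (s.toList.take L) else scanB counts L rest)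
              else scanB counts L rest from rfl]
        rw [if_pos hs]
        rw [show pick (s :: rest) L = if L ≤ cpBest s rest
            then s.toList.take L else pick rest L from rfl]
        by_cases hcond : L ≤ cpBest s rest
        · rw [if_pos (hiff.mpr hcond), if_pos hcond]
        · rw [if_neg (fun h => hcond (hiff.mp h)), if_neg hcond]
          -- no string in rest shares with s
          have hzero : cnt = 0 := by
            by_contra hne
            have hpos : 0 < cnt := Nat.pos_of_ne_zero hne
            rcases List.countP_pos_iff.mp hpos with ⟨t, ht, hshared⟩
            simp only [decide_eq_true_eq] at hshared
            exact hcond ((le_cpBest_iff s L hL rest).mpr ⟨t, ht, by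
              rw [le_cpLen_iff]; exact ⟨hs, hshared.1, hshared.2.symm⟩⟩)
          refine scanB_eq_pick L hL counts rest (fun t ht hLt => ?_)
          have hnots : ¬ (L ≤ s.toList.length ∧ s.toList.take L = t.toList.take L) := by
            rintro ⟨_, heq⟩
            have : 0 < cnt :=
              List.countP_pos_iff.mpr ⟨t, ht, by
                simp only [decide_eq_true_eq]; exact ⟨hLt, heq.symm⟩⟩
            omega
          rw [hyp t (by simp [ht]) hLt, hcons t, if_neg hnots]
          norm_num
      · rw [show scanB counts L (s :: rest)
            = if L ≤ s.toList.length then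
                (if 2 ≤ counts.getD (String.ofList (s.toList.take L)) 0
                 then String.ofList (s.toList.take L) else scanB counts L rest)
              else scanB counts L rest from rfl]
        rw [if_neg hs]
        have hpickcond : ¬ (L ≤ cpBest s rest) := by
          intro h
          rcases (le_cpBest_iff s L hL rest).mp h with ⟨t, ht, hLt⟩
          exact hs (le_trans hLt (cpLen_le_left _ _))
        rw [show pick (s :: rest) L = if L ≤ cpBest s rest
            then s.toList.take L else pick rest L from rfl, if_neg hpickcond]
        refine scanB_eq_pick L hL counts rest (fun t ht hLt => ?_)
        rw [hyp t (by simp [ht]) hLt, hcons t, if_neg (fun h => hs h.1)]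
        norm_num

-- ===== VERDICT (by name: the statement is the Claim_ definition above) =====
theorem longest_prefix_shared_by_at_least_two_spec : Claim_equal_longest_prefix_shared_by_at_least_two := by
  unfold Claim_equal_longest_prefix_shared_by_at_least_two Spec_longest_prefix_shared_by_at_least_two
  intro strs _
  have hA : longest_prefix_shared_by_at_least_two strs
      = if 0 < mp strs then String.ofList (pick strs (mp strs)) else "" := by
    rw [show longest_prefix_shared_by_at_least_two strs = loopA strs "" from rfl, loopA_char]
    simp
  rw [hA]
  rw [show longest_prefix_shared_by_at_least_two_alt strs
      = (if maxAdj (PySem.List.sorted strs (fun x => x) false) = 0 then ""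
         else scanB (buildCounts strs (maxAdj (PySem.List.sorted strs (fun x => x) false)))
                (maxAdj (PySem.List.sorted strs (fun x => x) false)) strs) from rfl]
  rw [maxAdj_sorted_eq_mp]
  by_cases h : mp strs = 0
  · rw [if_pos h, if_neg (by omega)]
  · rw [if_neg h, if_pos (by omega)]
    refine (scanB_eq_pick (mp strs) (by omega) (buildCounts strs (mp strs)) strs ?_).symm
    intro t ht hLt
    rw [show buildCounts strs (mp strs) = strs.foldl (fun d s =>
        if (mp strs) ≤ s.toList.length then
          let p := String.ofList (s.toList.take (mp strs))
          d.insert p (d.getD p 0 + 1)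
        else d) PySem.Dict.empty from rfl]
    rw [buildCounts_getD]
    rw [PySem.Dict.getD_empty]
    simp [String.toList_ofList]
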